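-- pv_equiv track=rewrite | github.com/BenSmits/Master-thesis-project | analysis of tweets.py | find_emo
-- ===== SOURCE A (Python) =====
-- def find_emo(txt, emo_lookup):
--     '''
--     counts the occurence of each emotion in the text
--     txt: a list of words
--     emo_lookup: a dataframe where words can be looked up in the index
--     returns: a list with all emotions added up
--     '''
--     if type(emo_lookup) != type(list()):
--         raise TypeError('"emo_lookup" should be type: list')
--     emo_count = 0
--     for word in txt:
--         if word in emo_lookup:
--             emo_count += 1
--
--     return emo_count
-- ===== SOURCE B (Python) =====
-- def find_emo(txt, emo_lookup):
--     if type(emo_lookup) != type(list()):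
--         raise TypeError('"emo_lookup" should be type: list')
--     counts = {}
--     for word in txt:
--         counts[word] = counts.get(word, 0) + 1
--     return sum(c for w, c in counts.items() if w in emo_lookup)
-- ===== Notes on version B (the rewrite author's own statement) =====
-- stated objective: faster
-- what changed: Replaces the per-word scan-and-increment loop by an aggregate-first strategy: build a frequency table of txt once, then sum the counts over the distinct words that are in emo_lookup (membership is tested once per distinct word, not once per occurrence).
import Mathlib
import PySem

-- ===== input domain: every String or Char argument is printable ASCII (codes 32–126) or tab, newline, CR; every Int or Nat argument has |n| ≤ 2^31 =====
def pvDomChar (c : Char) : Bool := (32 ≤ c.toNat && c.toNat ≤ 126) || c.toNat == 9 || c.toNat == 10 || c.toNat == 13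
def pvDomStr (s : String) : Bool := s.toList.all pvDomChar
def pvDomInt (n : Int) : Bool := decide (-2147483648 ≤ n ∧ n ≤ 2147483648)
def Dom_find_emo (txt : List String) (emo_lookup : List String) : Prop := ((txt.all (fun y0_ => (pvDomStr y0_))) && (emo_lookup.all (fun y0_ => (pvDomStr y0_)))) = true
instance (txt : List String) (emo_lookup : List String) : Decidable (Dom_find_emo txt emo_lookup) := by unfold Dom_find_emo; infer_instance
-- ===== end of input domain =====

-- B builds a frequency table of txt once, then sums the counts of the distinct words
-- that are members of emo_lookup, instead of A's per-word scan of emo_lookup (alternative decomposition).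
-- The TypeError guard of the Python is statically satisfied here (emo_lookup : List String), so both ports are total.

-- ===== PORT A =====
-- for word in txt: if word in emo_lookup: emo_count += 1
def find_emo (txt : List String) (emo_lookup : List String) : Int :=
  txt.foldl (fun emo_count word => if emo_lookup.contains word then emo_count + 1 else emo_count) 0

-- ===== PORT B =====
-- counts = {}; for word in txt: counts[word] = counts.get(word, 0) + 1
-- return sum(c for w, c in counts.items() if w in emo_lookup)
def find_emo_alt (txt : List String) (emo_lookup : List String) : Int :=
  let counts : PySem.Dict String Int :=
    txt.foldl (fun d word => d.insert word (d.getD word 0 + 1)) PySem.Dict.empty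
  counts.items.foldl (fun acc wc => if emo_lookup.contains wc.1 then acc + wc.2 else acc) 0

-- ===== PRECONDITION & SPEC =====
def Spec_find_emo (txt : List String) (emo_lookup : List String) (out : Int) : Prop := out = find_emo_alt txt emo_lookup
instance (txt : List String) (emo_lookup : List String) (out : Int) : Decidable (Spec_find_emo txt emo_lookup out) := by unfold Spec_find_emo; infer_instance

-- ===== CLAIM (what is proved, stated in full; the proofs are below) =====
def Claim_equal_find_emo : Prop := ∀ (txt : List String) (emo_lookup : List String), Dom_find_emo txt emo_lookup → Spec_find_emo txt emo_lookup (find_emo txt emo_lookup)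

-- ===== LEMMAS AND PROOFS =====

-- A's loop counts the words of txt that occur in emo_lookup.
theorem find_emo_eq_countP (txt emo : List String) (acc : Int) :
    txt.foldl (fun c w => if emo.contains w then c + 1 else c) acc
      = acc + (txt.countP (fun w => emo.contains w) : Int) := by
  induction txt generalizing acc with
  | nil => simp
  | cons w ws ih =>
    simp only [List.foldl_cons, List.countP_cons, ih]
    by_cases h : w ∈ emo <;> simp [h] <;> ring

-- B's summation loop over a list of pairs.
theorem foldl_pairs_sum (emo : List String) (l : List (String × Int)) (acc : Int) :
    l.foldl (fun a wc => if emo.contains wc.1 then a + wc.2 else a) acc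
      = acc + ((l.filter (fun wc => emo.contains wc.1)).map Prod.snd).sum := by
  induction l generalizing acc with
  | nil => simp
  | cons wc l ih =>
    simp only [List.foldl_cons, List.filter_cons, ih]
    by_cases h : wc.1 ∈ emo <;> simp [h] <;> ring

-- summing counts over any nodup list with the same members as txt.dedup
theorem sum_counts_over_pydedup (txt emo : List String) :
    (((PySem.List.dedup txt).filter (fun w => emo.contains w)).map (fun w => (List.count w txt : Int))).sum
      = (txt.countP (fun w => emo.contains w) : Int) := by
  have hperm : (PySem.List.dedup txt).Perm txt.dedup := by
    refine List.perm_of_nodup_nodup_toFinset_eq (PySem.List.nodup_dedup txt) txt.nodup_dedup ?_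
    ext w
    simp
  have h := hperm.filter (fun w => emo.contains w)
  have h2 := (h.map (fun w => (List.count w txt : Int))).sum_eq
  rw [h2]
  rw [show ((txt.dedup.filter (fun w => emo.contains w)).map fun w => (List.count w txt : Int))
        = List.map Nat.cast ((txt.dedup.filter (fun w => emo.contains w)).map fun w => List.count w txt) by
      rw [List.map_map]; rfl]
  rw [← Nat.cast_list_sum, List.sum_map_count_dedup_filter_eq_countP]

-- ===== VERDICT (by name: the statement is the Claim_ definition above) =====
theorem find_emo_spec : Claim_equal_find_emo := by
  intro txt emo_lookup _
  unfold Spec_find_emo find_emo find_emo_alt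
  show List.foldl (fun emo_count word => if emo_lookup.contains word = true then emo_count + 1 else emo_count) (0 : Int) txt
      = List.foldl (fun acc wc => if emo_lookup.contains wc.1 = true then acc + wc.2 else acc) (0 : Int)
          ((txt.foldl (fun d word => d.insert word (d.getD word 0 + 1)) PySem.Dict.empty).items)
  rw [PySem.Dict.foldl_insert_getD_add_one_eq_counter, PySem.Dict.items_counter]
  rw [foldl_pairs_sum, find_emo_eq_countP]
  rw [← PySem.List.dedup_eq_ofList]
  rw [List.filter_map, List.map_map]
  have : (Prod.snd ∘ fun k => (k, (List.count k txt : Int))) = fun w => (List.count w txt : Int) := rfl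
  rw [this, show ((fun wc : String × Int => emo_lookup.contains wc.1) ∘ fun k => (k, (List.count k txt : Int))) = fun w => emo_lookup.contains w from rfl]
  rw [sum_counts_over_pydedup]
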